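-- pv_equiv track=rewrite | github.com/Nicefree19/14.AI_Agent | scripts/telegram/skills/generation_skills.py | _build_owner_sheet
-- ===== SOURCE A (Python) =====
-- from typing import Any, Dict, List, Optional
--
-- def _build_owner_sheet(
--     issues: List[Dict], headers: List[str]
-- ) -> Dict[str, tuple]:
--     """담당자별 시트 구성."""
--     owners: Dict[str, List[Dict]] = {}
--     for issue in issues:
--         owner = issue.get("owner", "미지정")
--         owners.setdefault(owner, []).append(issue)
--
--     result = {}
--     for owner, owner_issues in sorted(owners.items()):
--         sheet_name = f"담당_{owner}"[:31]
--         rows = []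
--         for issue in _sort_issues(owner_issues):
--             rows.append([
--                 issue.get("issue_id", ""),
--                 issue.get("title", ""),
--                 issue.get("category", ""),
--                 issue.get("priority", ""),
--                 issue.get("status", ""),
--                 issue.get("owner", ""),
--                 issue.get("due_date", ""),
--                 issue.get("created", ""),
--             ])
--         result[sheet_name] = (headers, rows)
--
--     return result
--
-- def _sort_issues(issues: List[Dict]) -> List[Dict]:
--     """이슈를 우선순위 → 마감일 순으로 정렬."""
--     priority_order = {"critical": 0, "high": 1, "medium": 2, "normal": 3, "low": 4}
--     return sorted(
--         issues,
--         key=lambda x: (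
--             priority_order.get(x.get("priority", "medium").lower(), 5),
--             x.get("due_date", "9999-12-31"),
--         ),
--     )
-- ===== SOURCE B (Python) =====
-- def _build_owner_sheet(issues, headers):
--     """담당자별 시트 구성 — sorted distinct owners + per-owner filter (no grouping dict)."""
--     priority_order = {"critical": 0, "high": 1, "medium": 2, "normal": 3, "low": 4}
--     fields = ["issue_id", "title", "category", "priority", "status",
--               "owner", "due_date", "created"]
--     sort_key = lambda x: (
--         priority_order.get(x.get("priority", "medium").lower(), 5),
--         x.get("due_date", "9999-12-31"),
--     )
--     result = {}
--     for owner in sorted({x.get("owner", "미지정") for x in issues}):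
--         group = sorted((x for x in issues if x.get("owner", "미지정") == owner), key=sort_key)
--         result[f"담당_{owner}"[:31]] = (headers, [[x.get(f, "") for f in fields] for x in group])
--     return result
-- ===== Notes on version B (the rewrite author's own statement) =====
-- stated objective: alternative
-- what changed: Replaces A's setdefault-dict grouping followed by sorting the items and each bucket with a dict-free decomposition: sort the distinct owners once, then for each owner filter-and-sort its issues directly from the input list, building rows by mapping over a field-name list.
import Mathlib
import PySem

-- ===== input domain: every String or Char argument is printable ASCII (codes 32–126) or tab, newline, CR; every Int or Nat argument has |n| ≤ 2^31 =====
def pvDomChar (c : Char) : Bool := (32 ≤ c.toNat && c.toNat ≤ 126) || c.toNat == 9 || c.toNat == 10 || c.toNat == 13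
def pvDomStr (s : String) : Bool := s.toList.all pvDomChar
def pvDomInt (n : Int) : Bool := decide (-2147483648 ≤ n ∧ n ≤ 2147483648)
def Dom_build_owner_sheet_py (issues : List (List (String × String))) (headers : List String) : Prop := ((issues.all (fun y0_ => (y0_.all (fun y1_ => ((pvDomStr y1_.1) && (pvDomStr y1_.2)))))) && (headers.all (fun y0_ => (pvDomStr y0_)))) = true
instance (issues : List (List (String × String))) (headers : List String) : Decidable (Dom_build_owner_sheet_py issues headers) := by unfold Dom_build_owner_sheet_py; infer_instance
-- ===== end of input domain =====

-- B replaces A's dict-grouping-then-sort-each-bucket by sorted distinct owners with a per-owner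
-- filter-and-sort pass (no grouping dict); alternative decomposition, same output.


-- ===== shared helpers (code both Python sources contain verbatim) =====
-- issue.get(k, d): an issue is a Python dict, lookup = first match
def pvGet (issue : List (String × String)) (k d : String) : String :=
  (PySem.Dict.mk issue).getD k d

-- priority_order
def pvPrio : PySem.Dict String Int :=
  PySem.Dict.ofList [("critical", 0), ("high", 1), ("medium", 2), ("normal", 3), ("low", 4)]

-- lambda x: (priority_order.get(x.get("priority","medium").lower(), 5), x.get("due_date","9999-12-31"))
def pvKey1 (x : List (String × String)) : Int :=
  pvPrio.getD (PySem.Str.lower (pvGet x "priority" "medium")) 5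
def pvKey2 (x : List (String × String)) : String :=
  pvGet x "due_date" "9999-12-31"

-- f"담당_{owner}"[:31]  (concatenation then slice, by code points — exact)
def pvSheetName (owner : String) : String :=
  String.ofList (PySem.Chars.slice ("담당_".toList ++ owner.toList) none (some 31))

-- ===== PORT A =====
-- _sort_issues: sorted(issues, key=lambda x: (prio, due))
def sortIssuesA (issues : List (List (String × String))) : List (List (String × String)) :=
  PySem.List.sorted2 issues pvKey1 pvKey2

-- rows.append([issue.get("issue_id",""), …, issue.get("created","")])
def rowA (issue : List (String × String)) : List String :=
  [pvGet issue "issue_id" "", pvGet issue "title" "", pvGet issue "category" "",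
   pvGet issue "priority" "", pvGet issue "status" "", pvGet issue "owner" "",
   pvGet issue "due_date" "", pvGet issue "created" ""]

def build_owner_sheet_py (issues : List (List (String × String))) (headers : List String) : List (String × List String × List (List String)) :=
  -- owners.setdefault(owner, []).append(issue) over the issues
  let owners : PySem.Dict String (List (List (String × String))) :=
    issues.foldl (fun d issue => d.modify (pvGet issue "owner" "미지정") [] (· ++ [issue])) PySem.Dict.empty
  -- sorted(owners.items()): tuple comparison; dict keys are distinct, so only the first
  -- component is ever compared — ported as a sort keyed on the first component
  let sortedItems := PySem.List.sorted owners.items (fun p => p.1) false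
  (sortedItems.foldl (fun r p =>
      r.insert (pvSheetName p.1)
        (headers, (sortIssuesA p.2).foldl (fun rows issue => rows ++ [rowA issue]) []))
    PySem.Dict.empty).items

-- ===== PORT B =====
-- fields
def pvFieldsB : List String :=
  ["issue_id", "title", "category", "priority", "status", "owner", "due_date", "created"]

def build_owner_sheet_py_alt (issues : List (List (String × String))) (headers : List String) : List (String × List String × List (List String)) :=
  ((PySem.List.sorted (PySem.Set.ofList (issues.map (fun x => pvGet x "owner" "미지정"))) (fun o => o) false).foldl
    (fun r owner =>
      let group := PySem.List.sorted2 (issues.filter (fun x => pvGet x "owner" "미지정" == owner)) pvKey1 pvKey2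
      r.insert (pvSheetName owner)
        (headers, group.map (fun x => pvFieldsB.map (fun f => pvGet x f ""))))
    PySem.Dict.empty).items

-- ===== PRECONDITION & SPEC =====
def Spec_build_owner_sheet_py (issues : List (List (String × String))) (headers : List String) (out : List (String × List String × List (List String))) : Prop := out = build_owner_sheet_py_alt issues headers
instance (issues : List (List (String × String))) (headers : List String) (out : List (String × List String × List (List String))) : Decidable (Spec_build_owner_sheet_py issues headers out) := by unfold Spec_build_owner_sheet_py; infer_instance

-- ===== CLAIM (what is proved, stated in full; the proofs are below) =====
def Claim_equal_build_owner_sheet_py : Prop := ∀ (issues : List (List (String × String))) (headers : List String), Dom_build_owner_sheet_py issues headers → Spec_build_owner_sheet_py issues headers (build_owner_sheet_py issues headers)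

-- ===== LEMMAS AND PROOFS =====

-- ===== VERDICT (by name: the statement is the Claim_ definition above) =====
theorem build_owner_sheet_py_spec : Claim_equal_build_owner_sheet_py := by
  intro issues headers _
  unfold Spec_build_owner_sheet_py build_owner_sheet_py build_owner_sheet_py_alt
  dsimp only
  set d : PySem.Dict String (List (List (String × String))) :=
    issues.foldl (fun d issue => d.modify (pvGet issue "owner" "미지정") [] (· ++ [issue])) PySem.Dict.empty with hd
  have hmap : d = (issues.map (fun i => (pvGet i "owner" "미지정", i))).foldl
      (fun d p => d.modify p.1 [] (· ++ [p.2])) PySem.Dict.empty := by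
    rw [List.foldl_map]
  have hkeys : d.keys = PySem.Set.ofList (issues.map (fun x => pvGet x "owner" "미지정")) := by
    rw [hd, PySem.Dict.keys_foldl_modify_key issues (fun x => pvGet x "owner" "미지정") []
        (fun _ x => (· ++ [x])) PySem.Dict.empty]
    simp [PySem.Set.update_nil_left]
  have hnodup : d.keys.Nodup := by
    rw [hkeys]; exact PySem.Set.nodup_ofList _
  have hgetD : ∀ o, d.getD o [] = issues.filter (fun x => pvGet x "owner" "미지정" == o) := by
    intro o
    rw [hmap, PySem.Dict.getD_foldl_modify_append, PySem.Dict.getD_empty, List.nil_append,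
        List.filter_map, List.map_map]
    simp [Function.comp_def]
  have hitems : d.items = d.keys.map (fun k => (k, d.getD k [])) :=
    PySem.Dict.items_eq_map_keys d hnodup []
  set so := PySem.List.sorted d.keys (fun o => o) false with hso
  have hsonodup : so.Nodup := (PySem.List.sorted_perm d.keys (fun o => o) false).nodup_iff.mpr hnodup
  have hsorted : PySem.List.sorted d.items (fun p => p.1) false
      = so.map (fun k => (k, d.getD k [])) := by
    apply PySem.List.sorted_eq_of_perm_of_pairwise_lt
    · rw [hitems]
      exact (PySem.List.sorted_perm d.keys (fun o => o) false).map _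
    · rw [List.pairwise_map]
      exact ((PySem.List.sorted_pairwise d.keys (fun o => o)).and hsonodup).imp
        (fun h => lt_of_le_of_ne h.1 h.2)
  rw [hsorted, ← hkeys, ← hso, List.foldl_map]
  congr 1
  congr 1
  funext r k
  rw [hgetD, PySem.List.foldl_append_singleton_eq_map]
  rfl
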